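-- pv_equiv track=rewrite | github.com/dlftls38/college | python/mult.py | russian_mult
-- ===== SOURCE A (Python) =====
-- def russian_mult(m,n):
--     if n>=1:
--         if n%2 ==0:
--             return russian_mult(m+m,n//2)
--         else:
--             return m+russian_mult(m+m,n//2)
--     else:
--         return 0
-- ===== SOURCE B (Python) =====
-- def russian_mult(m, n):
--     result = 0
--     while n >= 1:
--         if n % 2 != 0:
--             result += m
--         m += m
--         n //= 2
--     return result
-- ===== Notes on version B (the rewrite author's own statement) =====
-- stated objective: simpler
-- what changed: Replaced the recursive peasant multiplication by an iterative while loop with an explicit accumulator (result), halving n and doubling m in place.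
import Mathlib
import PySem

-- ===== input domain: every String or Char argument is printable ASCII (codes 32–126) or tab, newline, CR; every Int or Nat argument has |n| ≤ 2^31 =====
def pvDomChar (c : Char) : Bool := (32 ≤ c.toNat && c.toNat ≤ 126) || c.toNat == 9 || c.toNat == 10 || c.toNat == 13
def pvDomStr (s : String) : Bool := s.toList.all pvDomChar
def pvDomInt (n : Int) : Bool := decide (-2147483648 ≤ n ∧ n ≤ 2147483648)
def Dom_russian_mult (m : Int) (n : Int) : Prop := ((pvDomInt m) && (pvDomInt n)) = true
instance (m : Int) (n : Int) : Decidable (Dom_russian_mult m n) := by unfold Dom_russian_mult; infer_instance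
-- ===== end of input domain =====

-- B replaces the recursive peasant multiplication by an iterative loop with an explicit accumulator (simpler).

-- ===== PORT A =====
-- literal port of A's recursion; terminates because n//2 < n when n ≥ 1
def russian_mult (m : Int) (n : Int) : Int :=
  if n ≥ 1 then
    if PySem.Int.mod n 2 = 0 then
      russian_mult (m + m) (PySem.Int.floordiv n 2)
    else
      m + russian_mult (m + m) (PySem.Int.floordiv n 2)
  else 0
termination_by n.toNat
decreasing_by
  all_goals
    have h2 : PySem.Int.floordiv n 2 = n / 2 := PySem.Int.floordiv_eq_ediv_of_pos (by omega)
    rw [h2]; omega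

-- ===== PORT B =====
-- the while loop of Source B, with state (m, n, result)
def pvLoop (m : Int) (n : Int) (result : Int) : Int :=
  if n ≥ 1 then
    pvLoop (m + m) (PySem.Int.floordiv n 2)
      (if PySem.Int.mod n 2 ≠ 0 then result + m else result)
  else result
termination_by n.toNat
decreasing_by
  have h2 : PySem.Int.floordiv n 2 = n / 2 := PySem.Int.floordiv_eq_ediv_of_pos (by omega)
  rw [h2]; omega

def russian_mult_alt (m : Int) (n : Int) : Int := pvLoop m n 0

-- ===== PRECONDITION & SPEC =====
def Spec_russian_mult (m : Int) (n : Int) (out : Int) : Prop := out = russian_mult_alt m n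
instance (m : Int) (n : Int) (out : Int) : Decidable (Spec_russian_mult m n out) := by unfold Spec_russian_mult; infer_instance

-- ===== CLAIM (what is proved, stated in full; the proofs are below) =====
def Claim_equal_russian_mult : Prop := ∀ (m : Int) (n : Int), Dom_russian_mult m n → Spec_russian_mult m n (russian_mult m n)

-- ===== LEMMAS AND PROOFS =====
-- loop invariant: the loop adds A's value to the accumulator
theorem pvLoop_eq (m n result : Int) : pvLoop m n result = result + russian_mult m n := by
  by_cases h : n ≥ 1
  · have h2 : PySem.Int.floordiv n 2 = n / 2 := PySem.Int.floordiv_eq_ediv_of_pos (by omega)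
    have hdec : (n / 2).toNat < n.toNat := by omega
    rw [pvLoop, russian_mult]
    simp only [h, if_pos]
    by_cases hm : PySem.Int.mod n 2 = 0
    · simp only [hm, if_pos, ne_eq, not_true_eq_false, if_neg, not_false_eq_true]
      rw [h2, pvLoop_eq (m + m) (n / 2) result]
    · simp only [hm, if_neg, ne_eq, not_false_eq_true, if_pos]
      rw [h2, pvLoop_eq (m + m) (n / 2) (result + m)]
      ring
  · rw [pvLoop, russian_mult]
    simp [h]
termination_by n.toNat

-- ===== VERDICT (by name: the statement is the Claim_ definition above) =====
theorem russian_mult_spec : Claim_equal_russian_mult := by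
  intro m n _
  show _ = _
  rw [russian_mult_alt, pvLoop_eq, zero_add]
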